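-- pv_equiv track=rewrite | github.com/AlanCasanova7/Python_School_ex1to3 | program03.py | es3BAD
-- ===== SOURCE A (Python) =====
-- def es3BAD(lista, testo):
--   testo_copy = testo
--
--   most_seen_word = ''
--   max_occurency = 0
--
--   used_words = list(lista).copy()
--
--   for word in lista[::-1]:
--     occurency = 0
--     while testo_copy.find(word) != -1:
--       occurency += 1
--       testo_copy = testo_copy.replace(word, '', 1)
--     if occurency == 0:
--       used_words.remove(word)
--     elif occurency > 0:
--       lista.remove(word)
--     if occurency > max_occurency:
--       max_occurency = occurency
--       most_seen_word = word
--     elif occurency == max_occurency and word < most_seen_word: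
--       most_seen_word = word
--
--   sorted(used_words, reverse = False)
--
--   to_return = (used_words, most_seen_word)
--   return to_return
-- ===== SOURCE B (Python) =====
-- def es3BAD(lista, testo):
--     text = list(testo)
--     most_seen_word = ''
--     max_occurency = 0
--     to_drop = {}
--     for word in reversed(lista):
--         w = list(word)
--         k = len(w)
--         stack = []
--         occurency = 0
--         for ch in text:
--             stack.append(ch)
--             if len(stack) >= k and stack[len(stack) - k:] == w:
--                 del stack[len(stack) - k:]
--                 occurency += 1
--         text = stack
--         if occurency == 0:
--             to_drop[word] = to_drop.get(word, 0) + 1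
--         if occurency > max_occurency:
--             max_occurency = occurency
--             most_seen_word = word
--         elif occurency == max_occurency and word < most_seen_word:
--             most_seen_word = word
--     used_words = []
--     drops = dict(to_drop)
--     for word in lista:
--         if drops.get(word, 0) > 0:
--             drops[word] = drops[word] - 1
--         else:
--             used_words.append(word)
--     return (used_words, most_seen_word)
-- ===== Notes on version B (the rewrite author's own statement) =====
-- stated objective: alternative
-- what changed: The inner `while find/replace` loop (one full rescan and string copy per occurrence) is replaced by a single stack-based pass over the text per word, and the repeated `used_words.remove` calls are replaced by a zero-count dict plus one final filter pass; B trades A's C-level find/replace primitives for one explicit per-character pass.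
import Mathlib
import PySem

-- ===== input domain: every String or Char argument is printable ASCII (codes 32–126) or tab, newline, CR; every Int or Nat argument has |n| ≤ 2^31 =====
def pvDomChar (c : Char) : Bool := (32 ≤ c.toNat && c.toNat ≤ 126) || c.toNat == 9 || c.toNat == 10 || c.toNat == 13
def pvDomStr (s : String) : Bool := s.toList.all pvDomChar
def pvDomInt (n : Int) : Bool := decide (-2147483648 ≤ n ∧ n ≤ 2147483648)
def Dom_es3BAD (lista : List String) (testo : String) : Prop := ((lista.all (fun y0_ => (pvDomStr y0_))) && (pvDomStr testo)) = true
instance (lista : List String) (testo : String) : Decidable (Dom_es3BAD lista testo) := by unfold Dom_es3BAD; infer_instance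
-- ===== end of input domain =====

-- B replaces A's inner find/replace loop by a single stack-based pass over the text per word
-- and A's repeated list.remove bookkeeping by a counter dict plus one filter pass (a different
-- algorithm, not claimed faster); the equivalence proved is about the RETURN value only
-- (A also mutates its argument `lista` in place, B does not).

-- ===== PORT A =====

-- s.replace(w, '', 1): delete the leftmost occurrence of w (exact, including w = "")
def pyReplace1Del (s w : String) : String :=
  let i := PySem.Str.find s w
  if i = -1 then s
  else String.ofList (s.toList.take i.toNat ++ s.toList.drop (i.toNat + w.toList.length))

-- the inner `while testo_copy.find(word) != -1` loop; the fuel only makes it total: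
-- each iteration removes len(word) ≥ 1 characters under Pre_, so length+1 fuel is never exhausted
def es3BADWhile (word : String) : Nat → String → Nat → String × Nat
  | 0, t, occ => (t, occ)
  | f+1, t, occ =>
    if PySem.Str.find t word ≠ -1 then
      es3BADWhile word f (pyReplace1Del t word) (occ + 1)
    else (t, occ)

-- one iteration of A's `for word in lista[::-1]` loop;
-- state: (testo_copy, most_seen_word, max_occurency, used_words, lista-as-mutated).
-- list.remove's ValueError is unreachable (each word is removed at most as often as it occurs
-- in the iterated snapshot), so `.getD` on the Option never takes its default here
def es3BADStep (st : String × String × Nat × List String × List String) (word : String) :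
    String × String × Nat × List String × List String :=
  let (t, msw, mx, used, lst) := st
  let r := es3BADWhile word (t.toList.length + 1) t 0
  let used' := if r.2 = 0 then (PySem.List.remove? used word).getD used else used
  let lst' := if r.2 = 0 then lst else (PySem.List.remove? lst word).getD lst
  let mm : Nat × String :=
    if r.2 > mx then (r.2, word)
    else if r.2 = mx ∧ word < msw then (mx, word) else (mx, msw)
  (r.1, mm.2, mm.1, used', lst')

def es3BAD (lista : List String) (testo : String) : List String × String :=
  -- `sorted(used_words, reverse=False)` in A discards its result: no effect on the return value
  let st := ((PySem.List.slice? lista none none (-1)).getD []).foldl es3BADStep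
      (testo, "", 0, lista, lista)
  (st.2.2.2.1, st.2.1)

-- ===== PORT B =====

-- single pass over the text: push each char, pop a completed occurrence of w off the top
-- (`stack[len(stack)-k:] == w` / `del stack[len(stack)-k:]`)
def es3BADScan (w : List Char) : List Char → List Char → Nat → List Char × Nat
  | stk, [], occ => (stk, occ)
  | stk, c :: rest, occ =>
    let s := stk ++ [c]
    if w.length ≤ s.length ∧ s.drop (s.length - w.length) = w then
      es3BADScan w (s.take (s.length - w.length)) rest (occ + 1)
    else
      es3BADScan w s rest occ

-- one iteration of B's `for word in reversed(lista)` loop;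
-- state: (text as char list, most_seen_word, max_occurency, to_drop)
def es3BADAltStep (st : List Char × String × Nat × PySem.Dict String Nat) (word : String) :
    List Char × String × Nat × PySem.Dict String Nat :=
  let (text, msw, mx, drops) := st
  let r := es3BADScan word.toList [] text 0
  let drops' := if r.2 = 0 then drops.insert word (drops.getD word 0 + 1) else drops
  let mm : Nat × String :=
    if r.2 > mx then (r.2, word)
    else if r.2 = mx ∧ word < msw then (mx, word) else (mx, msw)
  (r.1, mm.2, mm.1, drops')

-- B's final loop: keep each word unless `drops` still owes a removal for its value
def es3BADDropFilter : List String → PySem.Dict String Nat → List String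
  | [], _ => []
  | x :: xs, d =>
    if d.getD x 0 > 0 then es3BADDropFilter xs (d.insert x (d.getD x 0 - 1))
    else x :: es3BADDropFilter xs d

def es3BAD_alt (lista : List String) (testo : String) : List String × String :=
  let st := lista.reverse.foldl es3BADAltStep (testo.toList, "", 0, PySem.Dict.empty)
  (es3BADDropFilter lista st.2.2.2, st.2.1)

-- ===== PRECONDITION & SPEC =====
-- Pre_ excludes lists containing the empty string: there A's while loop never terminates
-- (find('') is 0 and replace('', '', 1) leaves the text unchanged), so A returns nothing.
def Pre_es3BAD (lista : List String) (testo : String) : Prop := "" ∉ lista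
instance (lista : List String) (testo : String) : Decidable (Pre_es3BAD lista testo) := by unfold Pre_es3BAD; infer_instance
def pvWitness_es3BAD : List String × String := (["ab", "b"], "abab")

def Spec_es3BAD (lista : List String) (testo : String) (out : List String × String) : Prop := out = es3BAD_alt lista testo
instance (lista : List String) (testo : String) (out : List String × String) : Decidable (Spec_es3BAD lista testo out) := by unfold Spec_es3BAD; infer_instance

-- ===== CLAIM (what is proved, stated in full; the proofs are below) =====
def Claim_equal_es3BAD : Prop := ∀ (lista : List String) (testo : String), Dom_es3BAD lista testo → Pre_es3BAD lista testo → Spec_es3BAD lista testo (es3BAD lista testo)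

-- ===== LEMMAS AND PROOFS =====

-- list-level mirror of A's inner while loop
def pvListWhile (w : List Char) : Nat → List Char → Nat → List Char × Nat
  | 0, t, occ => (t, occ)
  | f+1, t, occ =>
    if PySem.Chars.find t w ≠ -1 then
      pvListWhile w f
        (t.take (PySem.Chars.find t w).toNat ++ t.drop ((PySem.Chars.find t w).toNat + w.length))
        (occ + 1)
    else (t, occ)

lemma toList_pyReplace1Del (t word : String) :
    (pyReplace1Del t word).toList =
      if PySem.Chars.find t.toList word.toList = -1 then t.toList
      else t.toList.take (PySem.Chars.find t.toList word.toList).toNat ++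
           t.toList.drop ((PySem.Chars.find t.toList word.toList).toNat + word.toList.length) := by
  simp only [pyReplace1Del, PySem.Str.find_eq]
  split_ifs with h <;> simp

lemma whileEq (word : String) : ∀ (f : Nat) (t : String) (occ : Nat),
    (es3BADWhile word f t occ).1.toList = (pvListWhile word.toList f t.toList occ).1 ∧
    (es3BADWhile word f t occ).2 = (pvListWhile word.toList f t.toList occ).2 := by
  intro f
  induction f with
  | zero => intro t occ; simp [es3BADWhile, pvListWhile]
  | succ f ih =>
    intro t occ
    rw [es3BADWhile, pvListWhile]
    by_cases h : PySem.Chars.find t.toList word.toList = -1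
    · simp [PySem.Str.find_eq, h]
    · have h' : PySem.Str.find t word ≠ -1 := by simpa [PySem.Str.find_eq] using h
      simp only [h', if_pos, h, ne_eq, not_false_eq_true]
      have hrepl := toList_pyReplace1Del t word
      rw [if_neg h] at hrepl
      have := ih (pyReplace1Del t word) (occ + 1)
      rw [hrepl] at this
      exact this

lemma infix_iff_drop (s w : List Char) : w <:+: s ↔ ∃ j, w <+: s.drop j := by
  rw [← PySem.Chars.isIn_iff_infix, ← PySem.Chars.exists_prefix_drop_iff_isIn]

lemma scan_eq_while (w : List Char) (hw : w ≠ []) :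
    ∀ (rest stk : List Char) (occ f : Nat), ¬ w <:+: stk → rest.length + 1 ≤ f →
      pvListWhile w f (stk ++ rest) occ = es3BADScan w stk rest occ := by
  have hk : 0 < w.length := List.length_pos_of_ne_nil hw
  intro rest
  induction rest with
  | nil =>
    intro stk occ f hno hf
    obtain ⟨f, rfl⟩ : ∃ f', f = f' + 1 := ⟨f - 1, by omega⟩
    have hfind : PySem.Chars.find (stk ++ []) w = -1 := by
      rw [List.append_nil]; exact (PySem.Chars.find_eq_neg_one_iff stk w).mpr hno
    rw [pvListWhile, if_neg (by simpa using hfind), es3BADScan, List.append_nil]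
  | cons c rest ih =>
    intro stk occ f hno hf
    have hslen : (stk ++ [c]).length = stk.length + 1 := by simp
    have hassoc : stk ++ c :: rest = (stk ++ [c]) ++ rest := by
      rw [List.append_assoc, List.singleton_append]
    have hf' : rest.length + 1 ≤ f - 1 := by simp at hf; omega
    by_cases hc : w.length ≤ (stk ++ [c]).length ∧
        List.drop ((stk ++ [c]).length - w.length) (stk ++ [c]) = w
    · -- a match completes at this character: it is the leftmost occurrence in the whole text
      obtain ⟨f, rfl⟩ : ∃ f', f = f' + 1 := ⟨f - 1, by omega⟩
      obtain ⟨hkle, hdropj⟩ := hc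
      rw [hslen] at hkle
      have hjs : (stk ++ [c]).length - w.length = stk.length + 1 - w.length := by omega
      rw [hjs] at hdropj
      have hjle : stk.length + 1 - w.length ≤ (stk ++ [c]).length := by omega
      have hjw : (stk.length + 1 - w.length) + w.length = (stk ++ [c]).length := by omega
      have hocc : w <+: ((stk ++ [c]) ++ rest).drop (stk.length + 1 - w.length) := by
        rw [List.drop_append_of_le_length hjle, hdropj]; exact List.prefix_append w rest
      have hinf : w <:+: (stk ++ [c]) ++ rest := (infix_iff_drop _ w).mpr ⟨_, hocc⟩
      have hnn : 0 ≤ PySem.Chars.find ((stk ++ [c]) ++ rest) w :=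
        (PySem.Chars.find_nonneg_iff _ w).mpr hinf
      obtain ⟨hpre, hmin⟩ := PySem.Chars.find_spec hnn
      have hile : (PySem.Chars.find ((stk ++ [c]) ++ rest) w).toNat ≤ stk.length + 1 - w.length := by
        by_contra hlt
        exact hmin _ (by omega) hocc
      have hij : (PySem.Chars.find ((stk ++ [c]) ++ rest) w).toNat = stk.length + 1 - w.length := by
        by_contra hne
        obtain ⟨i0, hi0⟩ : ∃ i0, (PySem.Chars.find ((stk ++ [c]) ++ rest) w).toNat = i0 := ⟨_, rfl⟩
        rw [hi0] at hne hile hpre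
        have hin : i0 ≤ stk.length := by omega
        have hdropgen : ∀ n ≤ stk.length, ((stk ++ [c]) ++ rest).drop n = stk.drop n ++ ([c] ++ rest) := by
          intro n hn; rw [List.append_assoc]; exact List.drop_append_of_le_length hn
        have hlen : w.length ≤ (stk.drop i0).length := by
          rw [List.length_drop]; omega
        have heq : w = (stk.drop i0).take w.length := by
          have h := List.prefix_iff_eq_take.mp hpre
          rw [hdropgen _ hin, List.take_append_of_le_length hlen] at h
          exact h
        have hwpre : w <+: stk.drop i0 := by
          rw [heq]; exact List.take_prefix _ _
        exact hno (hwpre.isInfix.trans (List.drop_suffix i0 stk).isInfix)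
      have hfind : PySem.Chars.find ((stk ++ [c]) ++ rest) w = ((stk.length + 1 - w.length : Nat) : Int) := by
        rw [← Int.toNat_of_nonneg hnn, hij]
      have hne' : PySem.Chars.find (stk ++ c :: rest) w ≠ -1 := by
        rw [hassoc, hfind]; omega
      have hcond : w.length ≤ (stk ++ [c]).length ∧
          List.drop ((stk ++ [c]).length - w.length) (stk ++ [c]) = w :=
        ⟨by rw [hslen]; omega, by rw [hjs]; exact hdropj⟩
      rw [pvListWhile, if_pos hne', es3BADScan, if_pos hcond]
      have htake : (stk ++ c :: rest).take (PySem.Chars.find (stk ++ c :: rest) w).toNat =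
          (stk ++ [c]).take (stk.length + 1 - w.length) := by
        rw [hassoc, hfind, Int.toNat_natCast, List.take_append_of_le_length hjle]
      have hdrop2 : (stk ++ c :: rest).drop
          ((PySem.Chars.find (stk ++ c :: rest) w).toNat + w.length) = rest := by
        rw [hassoc, hfind, Int.toNat_natCast, hjw, List.drop_left]
      rw [htake, hdrop2, hjs]
      have hjstk : stk.length + 1 - w.length ≤ stk.length := by omega
      have hno' : ¬ w <:+: (stk ++ [c]).take (stk.length + 1 - w.length) := by
        rw [List.take_append_of_le_length hjstk]
        intro hcon
        exact hno (hcon.trans (List.take_prefix _ stk).isInfix)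
      exact ih _ (occ + 1) f hno' hf'
    · -- no match completes here: stk ++ [c] still contains no occurrence of w
      have hno' : ¬ w <:+: (stk ++ [c]) := by
        intro hcon
        obtain ⟨j, hj⟩ := (infix_iff_drop _ w).mp hcon
        have hjlen := hj.length_le
        rw [List.length_drop] at hjlen
        by_cases hcase : j + w.length ≤ stk.length
        · have hjle : j ≤ stk.length := by omega
          have hdrop : (stk ++ [c]).drop j = stk.drop j ++ [c] :=
            List.drop_append_of_le_length hjle
          have hlen : w.length ≤ (stk.drop j).length := by
            rw [List.length_drop]; omega
          have heq : w = (stk.drop j).take w.length := by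
            have h := List.prefix_iff_eq_take.mp hj
            rw [hdrop, List.take_append_of_le_length hlen] at h
            exact h
          have hwpre : w <+: stk.drop j := by rw [heq]; exact List.take_prefix _ _
          exact hno (hwpre.isInfix.trans (List.drop_suffix j stk).isInfix)
        · have hlen : ((stk ++ [c]).drop j).length ≤ w.length := by
            rw [List.length_drop]; omega
          have hjeq : j = (stk ++ [c]).length - w.length := by omega
          exact hc ⟨by omega, by rw [← hjeq]; exact (hj.eq_of_length_le hlen).symm⟩
      have hf2 : rest.length + 1 ≤ f := by simp at hf; omega
      rw [hassoc, ih (stk ++ [c]) occ f hno' hf2, es3BADScan, if_neg hc]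

-- ---- used_words bookkeeping: repeated list.remove = counter + one filter pass ----

def pvUpd (f : String → Nat) (x : String) (v : Nat) : String → Nat :=
  fun y => if y = x then v else f y

def pvDropF : List String → (String → Nat) → List String
  | [], _ => []
  | x :: xs, f => if f x > 0 then pvDropF xs (pvUpd f x (f x - 1)) else x :: pvDropF xs f

lemma getD_insert_fun (d : PySem.Dict String Nat) (k : String) (v : Nat) :
    (fun y => (d.insert k v).getD y 0) = pvUpd (fun y => d.getD y 0) k v := by
  funext y
  by_cases h : y = k
  · subst h; simp [PySem.Dict.getD, PySem.Dict.get?_insert_self, pvUpd]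
  · simp [PySem.Dict.getD, PySem.Dict.get?_insert_of_ne _ _ h, pvUpd, h]

lemma dropFilter_eq_dropF : ∀ (base : List String) (d : PySem.Dict String Nat),
    es3BADDropFilter base d = pvDropF base (fun y => d.getD y 0) := by
  intro base
  induction base with
  | nil => intro d; rfl
  | cons x xs ih =>
    intro d
    rw [es3BADDropFilter, pvDropF]
    by_cases h : d.getD x 0 > 0
    · rw [if_pos h, if_pos h, ih, getD_insert_fun]
    · rw [if_neg h, if_neg h, ih]

lemma pvUpd_self (f : String → Nat) (x : String) : pvUpd f x (f x) = f := by
  funext y; by_cases h : y = x <;> simp [pvUpd, h]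

lemma pvUpd_upd_self (f : String → Nat) (x : String) (v v' : Nat) :
    pvUpd (pvUpd f x v) x v' = pvUpd f x v' := by
  funext y; by_cases h : y = x <;> simp [pvUpd, h]

lemma pvUpd_comm (f : String → Nat) (x y : String) (v v' : Nat) (h : x ≠ y) :
    pvUpd (pvUpd f x v) y v' = pvUpd (pvUpd f y v') x v := by
  funext z
  by_cases hz : z = y <;> by_cases hz' : z = x <;> simp [pvUpd, hz, hz'] <;> simp_all

lemma removeD_cons_of_ne (x w : String) (l : List String) (h : x ≠ w) :
    (PySem.List.remove? (x :: l) w).getD (x :: l) = x :: (PySem.List.remove? l w).getD l := by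
  rw [PySem.List.remove?_cons_of_ne _ h]
  cases PySem.List.remove? l w <;> simp

lemma dropF_bump : ∀ (base : List String) (f : String → Nat) (w : String),
    pvDropF base (pvUpd f w (f w + 1)) =
      (PySem.List.remove? (pvDropF base f) w).getD (pvDropF base f) := by
  intro base
  induction base with
  | nil => intro f w; simp [pvDropF, PySem.List.remove?]
  | cons x xs ih =>
    intro f w
    by_cases hxw : x = w
    · subst hxw
      by_cases h : f x > 0
      · rw [pvDropF, pvDropF, if_pos h]
        have hx : pvUpd f x (f x + 1) x = f x + 1 := by simp [pvUpd]
        rw [if_pos (by rw [hx]; omega), hx, pvUpd_upd_self]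
        have hEq : pvUpd f x (f x + 1 - 1)
            = pvUpd (pvUpd f x (f x - 1)) x ((pvUpd f x (f x - 1)) x + 1) := by
          rw [pvUpd_upd_self]
          have hv : (pvUpd f x (f x - 1)) x = f x - 1 := by simp [pvUpd]
          rw [hv]
          congr 1
          omega
        rw [hEq]
        exact ih (pvUpd f x (f x - 1)) x
      · have hfx : f x = 0 := by omega
        rw [pvDropF, pvDropF, if_neg h]
        have hx : pvUpd f x (f x + 1) x = f x + 1 := by simp [pvUpd]
        rw [if_pos (by rw [hx]; omega), hx, pvUpd_upd_self]
        have : pvUpd f x (f x + 1 - 1) = f := by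
          rw [show f x + 1 - 1 = f x from rfl, pvUpd_self]
        rw [this, PySem.List.remove?_cons_self]
        simp
    · have hx : pvUpd f w (f w + 1) x = f x := by simp [pvUpd, hxw]
      by_cases h : f x > 0
      · rw [pvDropF, pvDropF, if_pos (by rw [hx]; omega), if_pos h, hx]
        have hwx : w ≠ x := Ne.symm hxw
        rw [pvUpd_comm f w x _ _ hwx]
        have hw : (pvUpd f x (f x - 1)) w = f w := by simp [pvUpd, hwx]
        rw [← hw]
        exact ih (pvUpd f x (f x - 1)) w
      · rw [pvDropF, pvDropF, if_neg (by rw [hx]; omega), if_neg h]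
        rw [removeD_cons_of_ne x w _ hxw, ih]

lemma dropF_zero : ∀ (base : List String), pvDropF base (fun _ => 0) = base := by
  intro base
  induction base with
  | nil => rfl
  | cons x xs ih =>
    rw [pvDropF, if_neg (by simp), ih]

lemma dropFilter_empty (base : List String) :
    es3BADDropFilter base PySem.Dict.empty = base := by
  rw [dropFilter_eq_dropF]
  have : (fun y => (PySem.Dict.empty : PySem.Dict String Nat).getD y 0) = fun _ => (0 : Nat) := by
    funext y; simp [PySem.Dict.getD]
  rw [this, dropF_zero]

lemma dropFilter_bump (base : List String) (d : PySem.Dict String Nat) (w : String) :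
    es3BADDropFilter base (d.insert w (d.getD w 0 + 1)) =
      (PySem.List.remove? (es3BADDropFilter base d) w).getD (es3BADDropFilter base d) := by
  rw [dropFilter_eq_dropF, dropFilter_eq_dropF, getD_insert_fun]
  exact dropF_bump base _ w

-- ---- per-word counts agree ----

lemma innerEq (word : String) (hw : word ≠ "") (t : String) :
    (es3BADWhile word (t.toList.length + 1) t 0).1.toList =
      (es3BADScan word.toList [] t.toList 0).1 ∧
    (es3BADWhile word (t.toList.length + 1) t 0).2 =
      (es3BADScan word.toList [] t.toList 0).2 := by
  have hwl : word.toList ≠ [] := by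
    intro h
    exact hw (by have := congrArg String.ofList h; simpa using this)
  have h1 := whileEq word (t.toList.length + 1) t 0
  have h2 := scan_eq_while word.toList hwl t.toList [] 0 (t.toList.length + 1)
    (by intro hcon; exact hwl (List.eq_nil_of_infix_nil hcon)) (by omega)
  rw [List.nil_append] at h2
  rw [h2] at h1
  exact h1

-- ---- one outer-loop iteration preserves the relation ----

lemma stepRel (base : List String) (word : String) (hw : word ≠ "")
    (tA : String) (msw : String) (mx : Nat) (lst : List String)
    (tB : List Char) (drops : PySem.Dict String Nat) (ht : tA.toList = tB) :
    (es3BADStep (tA, msw, mx, es3BADDropFilter base drops, lst) word).1.toList =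
      (es3BADAltStep (tB, msw, mx, drops) word).1 ∧
    (es3BADStep (tA, msw, mx, es3BADDropFilter base drops, lst) word).2.1 =
      (es3BADAltStep (tB, msw, mx, drops) word).2.1 ∧
    (es3BADStep (tA, msw, mx, es3BADDropFilter base drops, lst) word).2.2.1 =
      (es3BADAltStep (tB, msw, mx, drops) word).2.2.1 ∧
    (es3BADStep (tA, msw, mx, es3BADDropFilter base drops, lst) word).2.2.2.1 =
      es3BADDropFilter base (es3BADAltStep (tB, msw, mx, drops) word).2.2.2 := by
  subst ht
  obtain ⟨h1, h2⟩ := innerEq word hw tA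
  simp only [es3BADStep, es3BADAltStep]
  refine ⟨by rw [h1], ?_, ?_, ?_⟩
  · rw [h2]
  · rw [h2]
  · rw [h2]
    by_cases h : (es3BADScan word.toList [] tA.toList 0).2 = 0
    · simp only [h, if_true]
      exact (dropFilter_bump base drops word).symm
    · simp only [if_neg h]

-- ---- the whole fold preserves the relation ----

lemma foldRel (base : List String) : ∀ (ws : List String), (∀ x ∈ ws, x ≠ "") →
    ∀ (tA : String) (msw : String) (mx : Nat) (used lst : List String)
      (tB : List Char) (drops : PySem.Dict String Nat),
      tA.toList = tB → used = es3BADDropFilter base drops →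
      (ws.foldl es3BADStep (tA, msw, mx, used, lst)).1.toList =
        (ws.foldl es3BADAltStep (tB, msw, mx, drops)).1 ∧
      (ws.foldl es3BADStep (tA, msw, mx, used, lst)).2.1 =
        (ws.foldl es3BADAltStep (tB, msw, mx, drops)).2.1 ∧
      (ws.foldl es3BADStep (tA, msw, mx, used, lst)).2.2.1 =
        (ws.foldl es3BADAltStep (tB, msw, mx, drops)).2.2.1 ∧
      (ws.foldl es3BADStep (tA, msw, mx, used, lst)).2.2.2.1 =
        es3BADDropFilter base (ws.foldl es3BADAltStep (tB, msw, mx, drops)).2.2.2 := by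
  intro ws
  induction ws with
  | nil =>
    intro _ tA msw mx used lst tB drops ht hu
    subst ht; subst hu
    exact ⟨rfl, rfl, rfl, rfl⟩
  | cons w ws ih =>
    intro hws tA msw mx used lst tB drops ht hu
    subst hu
    obtain ⟨h1, h2, h3, h4⟩ := stepRel base w (hws w (by simp)) tA msw mx lst tB drops ht
    rw [List.foldl_cons, List.foldl_cons]
    rcases hA : es3BADStep (tA, msw, mx, es3BADDropFilter base drops, lst) w with
      ⟨ta', msw', mx', used', lst'⟩
    rcases hB : es3BADAltStep (tB, msw, mx, drops) w with ⟨tb', mswb', mxb', drops'⟩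
    rw [hA, hB] at h1 h2 h3 h4
    simp only at h1 h2 h3 h4
    subst h2; subst h3
    exact ih (fun x hx => hws x (by simp [hx])) ta' msw' mx' used' lst' tb' drops' h1 h4


-- ===== VERDICT (by name: the statement is the Claim_ definition above) =====
theorem es3BAD_spec : Claim_equal_es3BAD := by
  intro lista testo _hdom hpre
  unfold Spec_es3BAD es3BAD es3BAD_alt
  rw [PySem.List.slice?_none_none_neg_one]
  simp only [Option.getD_some]
  obtain ⟨h1, h2, h3, h4⟩ := foldRel lista lista.reverse
    (fun x hx => by rintro rfl; exact hpre (List.mem_reverse.mp hx))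
    testo "" 0 lista lista testo.toList PySem.Dict.empty rfl (dropFilter_empty lista).symm
  rw [Prod.ext_iff]
  exact ⟨h4, h2⟩
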